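-- pv_equiv track=rewrite | github.com/ethanglaser/scikit-learn-intelex | ci_tools/triage_failure.py | _extract_step_section
-- ===== SOURCE A (Python) =====
-- def _extract_step_section(lines, step_name):
--     """Extract lines belonging to a specific step."""
--     in_section = False
--     section_lines = []
--
--     for line in lines:
--         # Step boundaries use ##[group] markers
--         if f"##[group]" in line and step_name.lower() in line.lower():
--             in_section = True
--             section_lines = []
--             continue
--         if in_section and "##[group]" in line:
--             # Next step started
--             break
--         if in_section:
--             section_lines.append(line)
--
--     return section_lines if section_lines else None
-- ===== SOURCE B (Python) =====
-- def _extract_step_section(lines, step_name):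
--     """Extract lines belonging to a specific step.
--
--     Locate-then-slice: find the first matching marker, then the first marker
--     in the tail; restart recursively on the tail when that marker also
--     matches, otherwise slice the section out.
--     """
--     key = step_name.lower()
--
--     def is_marker(line):
--         return "##[group]" in line
--
--     def is_match(line):
--         return is_marker(line) and key in line.lower()
--
--     i = next((i for i, l in enumerate(lines) if is_match(l)), None)
--     if i is None:
--         return None
--     tail = lines[i + 1:]
--     j = next((j for j, l in enumerate(tail) if is_marker(l)), None)
--     if j is None:
--         return tail or None
--     if is_match(tail[j]):
--         return _extract_step_section(tail, step_name)
--     return tail[:j] or None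
-- ===== Notes on version B (the rewrite author's own statement) =====
-- stated objective: alternative
-- what changed: Replaces the boolean-flag accumulating single pass with a locate-then-slice design: find the first matching marker, find the first marker in the tail, recursively restart on the tail when that marker also matches, otherwise return the slice between them.
import Mathlib
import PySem

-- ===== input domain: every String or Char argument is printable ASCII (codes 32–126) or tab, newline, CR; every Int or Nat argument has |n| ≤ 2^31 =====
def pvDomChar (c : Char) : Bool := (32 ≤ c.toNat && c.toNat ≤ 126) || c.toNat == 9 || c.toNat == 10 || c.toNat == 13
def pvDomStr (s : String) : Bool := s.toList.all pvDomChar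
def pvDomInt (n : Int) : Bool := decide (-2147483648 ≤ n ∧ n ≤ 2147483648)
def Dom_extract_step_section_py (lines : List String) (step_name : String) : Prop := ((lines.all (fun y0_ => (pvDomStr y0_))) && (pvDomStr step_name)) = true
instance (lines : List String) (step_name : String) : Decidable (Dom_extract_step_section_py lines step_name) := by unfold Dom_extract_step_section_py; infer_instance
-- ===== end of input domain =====

-- B replaces A's boolean-flag single pass by locate-then-slice (find indices, slice, recurse on restart); same cost, different decomposition.

-- ===== PORT A =====
-- the for-loop of A, state = (in_section, section_lines); break returns acc
def extractALoop (lines : List String) (step_name : String) (inSection : Bool) (acc : List String) : List String :=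
  match lines with
  | [] => acc
  | line :: rest =>
    if PySem.Str.isIn "##[group]" line && PySem.Str.isIn (PySem.Str.lower step_name) (PySem.Str.lower line) then
      extractALoop rest step_name true []
    else if inSection && PySem.Str.isIn "##[group]" line then
      acc
    else if inSection then
      extractALoop rest step_name true (acc ++ [line])
    else
      extractALoop rest step_name inSection acc

def extract_step_section_py (lines : List String) (step_name : String) : Option (List String) :=
  let r := extractALoop lines step_name false []
  if r = [] then none else some r

-- ===== PORT B =====
def bIsMarker (line : String) : Bool := PySem.Str.isIn "##[group]" line

def bIsMatch (key line : String) : Bool := bIsMarker line && PySem.Str.isIn key (PySem.Str.lower line)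

-- port of Source B's next((i for i, l in enumerate(xs) if p(l)), None)
def bFirstIdx (p : String → Bool) : List String → Option Nat
  | [] => none
  | l :: rest => if p l then some 0 else (bFirstIdx p rest).map (· + 1)

theorem bFirstIdx_lt {p : String → Bool} : ∀ {xs : List String} {i : Nat}, bFirstIdx p xs = some i → i < xs.length := by
  intro xs
  induction xs with
  | nil => intro i h; simp [bFirstIdx] at h
  | cons l rest ih =>
    intro i h
    by_cases hp : p l = true
    · simp [bFirstIdx, hp] at h ⊢; omega
    · simp [bFirstIdx, hp] at h
      obtain ⟨j, hj, rfl⟩ := h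
      have := ih hj
      simp; omega

-- lines[i+1:] and tail[:j] with nonnegative in-range indices are drop/take (exact here)
def bGo (key : String) (lines : List String) : Option (List String) :=
  match h : bFirstIdx (bIsMatch key) lines with
  | none => none
  | some i =>
    let tail := lines.drop (i + 1)
    match bFirstIdx bIsMarker tail with
    | none => if tail = [] then none else some tail
    | some j =>
      if bIsMatch key (tail.getD j "") then bGo key tail
      else
        let pre := tail.take j
        if pre = [] then none else some pre
termination_by lines.length
decreasing_by
  have := bFirstIdx_lt h
  simp only [List.length_drop]
  omega

def extract_step_section_py_alt (lines : List String) (step_name : String) : Option (List String) :=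
  bGo (PySem.Str.lower step_name) lines

-- ===== PRECONDITION & SPEC =====
def Spec_extract_step_section_py (lines : List String) (step_name : String) (out : Option (List String)) : Prop := out = extract_step_section_py_alt lines step_name
instance (lines : List String) (step_name : String) (out : Option (List String)) : Decidable (Spec_extract_step_section_py lines step_name out) := by unfold Spec_extract_step_section_py; infer_instance

-- ===== CLAIM (what is proved, stated in full; the proofs are below) =====
def Claim_equal_extract_step_section_py : Prop := ∀ (lines : List String) (step_name : String), Dom_extract_step_section_py lines step_name → Spec_extract_step_section_py lines step_name (extract_step_section_py lines step_name)

-- ===== LEMMAS AND PROOFS =====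

-- A's conditions are B's predicates, definitionally
theorem condA_eq (key l : String) : (PySem.Str.isIn "##[group]" l && PySem.Str.isIn key (PySem.Str.lower l)) = bIsMatch key l := rfl

theorem condM_eq (l : String) : PySem.Str.isIn "##[group]" l = bIsMarker l := rfl

theorem not_match_of_not_marker {key l : String} (h : bIsMarker l = false) : bIsMatch key l = false := by
  unfold bIsMatch; simp [h]

-- A's skip phase: before the first matching marker nothing happens
theorem skip_run (step_name : String) : ∀ (lines : List String) (acc : List String),
    extractALoop lines step_name false acc =
      match bFirstIdx (bIsMatch (PySem.Str.lower step_name)) lines with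
      | none => acc
      | some i => extractALoop (lines.drop (i + 1)) step_name true [] := by
  intro lines
  induction lines with
  | nil => intro acc; simp [extractALoop, bFirstIdx]
  | cons l rest ih =>
    intro acc
    rw [extractALoop, condA_eq, bFirstIdx]
    by_cases hm : bIsMatch (PySem.Str.lower step_name) l = true
    · simp only [hm, if_true, List.drop_succ_cons, List.drop_zero]
    · simp only [hm, Bool.false_eq_true, if_false, Bool.false_and]
      rw [ih acc]
      cases hf : bFirstIdx (bIsMatch (PySem.Str.lower step_name)) rest with
      | none => simp
      | some i => simp

-- A's collecting phase: accumulate up to the first marker; restart on a matching one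
theorem collect_run (step_name : String) : ∀ (tail : List String) (acc : List String),
    extractALoop tail step_name true acc =
      match bFirstIdx bIsMarker tail with
      | none => acc ++ tail
      | some j =>
        if bIsMatch (PySem.Str.lower step_name) (tail.getD j "") then
          extractALoop (tail.drop (j + 1)) step_name true []
        else acc ++ tail.take j := by
  intro tail
  induction tail with
  | nil => intro acc; simp [extractALoop, bFirstIdx]
  | cons l rest ih =>
    intro acc
    rw [extractALoop, condA_eq, condM_eq, bFirstIdx]
    by_cases hmk : bIsMarker l = true
    · simp only [hmk, if_true, Bool.true_and]
      by_cases hm : bIsMatch (PySem.Str.lower step_name) l = true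
      · simp only [hm, if_true, List.getD_cons_zero, List.drop_succ_cons, List.drop_zero]
      · simp only [hm, Bool.false_eq_true, if_false, List.getD_cons_zero, List.take_zero,
          List.append_nil]
    · have hm := not_match_of_not_marker (key := PySem.Str.lower step_name) (Bool.eq_false_iff.mpr hmk)
      simp only [hm, hmk, Bool.false_eq_true, if_false, Bool.true_and, if_true]
      rw [ih (acc ++ [l])]
      cases hf : bFirstIdx bIsMarker rest with
      | none => simp
      | some j =>
        simp only [Option.map_some, List.getD_cons_succ, List.drop_succ_cons, List.take_succ_cons]
        by_cases hx : bIsMatch (PySem.Str.lower step_name) (rest.getD j "") = true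
        · simp only [hx, if_true]
        · simp [hx]

-- if the first marker matches, it is also the first match
theorem firstMatch_of_firstMarker {key : String} : ∀ {tail : List String} {j : Nat},
    bFirstIdx bIsMarker tail = some j → bIsMatch key (tail.getD j "") = true →
    bFirstIdx (bIsMatch key) tail = some j := by
  intro tail
  induction tail with
  | nil => intro j h; simp [bFirstIdx] at h
  | cons l rest ih =>
    intro j h hx
    by_cases hmk : bIsMarker l = true
    · simp [bFirstIdx, hmk] at h
      subst h
      simp only [List.getD_cons_zero] at hx
      simp [bFirstIdx, hx]
    · have hm : bIsMatch key l = false := not_match_of_not_marker (Bool.eq_false_iff.mpr hmk)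
      simp [bFirstIdx, hmk] at h
      obtain ⟨j2, hj2, rfl⟩ := h
      simp only [List.getD_cons_succ] at hx
      simp [bFirstIdx, hm, ih hj2 hx]

-- A in its if-then-else normal form
theorem A_norm (lines : List String) (step_name : String) :
    extract_step_section_py lines step_name =
      (if extractALoop lines step_name false [] = [] then none
       else some (extractALoop lines step_name false [])) := rfl

theorem main_equiv (step_name : String) : ∀ (lines : List String),
    extract_step_section_py lines step_name = bGo (PySem.Str.lower step_name) lines := by
  have H : ∀ (n : Nat) (lines : List String), lines.length < n →
      extract_step_section_py lines step_name = bGo (PySem.Str.lower step_name) lines := by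
    intro n
    induction n with
    | zero => intro lines h; omega
    | succ n ih =>
      intro lines hlen
      rw [A_norm, skip_run step_name lines [], bGo]
      cases hf : bFirstIdx (bIsMatch (PySem.Str.lower step_name)) lines with
      | none => simp
      | some i =>
        have hi := bFirstIdx_lt hf
        simp only [collect_run step_name (lines.drop (i + 1)) [], List.nil_append]
        cases hk : bFirstIdx bIsMarker (lines.drop (i + 1)) with
        | none =>
          by_cases he : lines.drop (i + 1) = [] <;> simp [he]
        | some j =>
          by_cases hx : bIsMatch (PySem.Str.lower step_name) ((lines.drop (i + 1)).getD j "") = true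
          · simp only [hx, if_true]
            have htl : (lines.drop (i + 1)).length < n := by
              simp only [List.length_drop]; omega
            have hrec := ih (lines.drop (i + 1)) htl
            have e1 : extract_step_section_py (lines.drop (i + 1)) step_name =
                (if extractALoop ((lines.drop (i + 1)).drop (j + 1)) step_name true [] = [] then none
                 else some (extractALoop ((lines.drop (i + 1)).drop (j + 1)) step_name true [])) := by
              rw [A_norm, skip_run step_name (lines.drop (i + 1)) [],
                firstMatch_of_firstMarker hk hx]
            rw [e1] at hrec
            exact hrec
          · simp only [hx, Bool.false_eq_true, if_false]
  intro lines
  exact H (lines.length + 1) lines (by omega)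

-- ===== VERDICT (by name: the statement is the Claim_ definition above) =====
theorem extract_step_section_py_spec : Claim_equal_extract_step_section_py := by
  intro lines step_name _
  unfold Spec_extract_step_section_py extract_step_section_py_alt
  exact main_equiv step_name lines
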